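-- pv_equiv track=rewrite | github.com/Jiayikung/Python-learning | hangman.py | dashed
-- ===== SOURCE A (Python) =====
-- def dashed(answer, guess):
--     """
--     :param answer: str, the correct answer in the game
--     :param guess: str, a string of guesses has inputted by the user
--     :return result: str, a combination of the dashed ('-') and alphabets
--     """
--     result = ''
--     for i in range(len(answer)):
--         if answer[i] in guess:
--             result += answer[i]
--         else:
--             result += '-'
--     return result
-- ===== SOURCE B (Python) =====
-- def dashed(answer, guess):
--     positions = {}
--     for i, ch in enumerate(answer):
--         positions.setdefault(ch, []).append(i)
--     result = ['-'] * len(answer)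
--     for ch in dict.fromkeys(guess):
--         for i in positions.get(ch, []):
--             result[i] = ch
--     return ''.join(result)
-- ===== Notes on version B (the rewrite author's own statement) =====
-- stated objective: alternative
-- what changed: B builds a dict from each character of answer to the list of its positions in one pass, starts from an all-dash buffer, and writes each guessed character into its recorded positions, instead of A's per-index substring-membership test of answer[i] in guess.
import Mathlib
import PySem

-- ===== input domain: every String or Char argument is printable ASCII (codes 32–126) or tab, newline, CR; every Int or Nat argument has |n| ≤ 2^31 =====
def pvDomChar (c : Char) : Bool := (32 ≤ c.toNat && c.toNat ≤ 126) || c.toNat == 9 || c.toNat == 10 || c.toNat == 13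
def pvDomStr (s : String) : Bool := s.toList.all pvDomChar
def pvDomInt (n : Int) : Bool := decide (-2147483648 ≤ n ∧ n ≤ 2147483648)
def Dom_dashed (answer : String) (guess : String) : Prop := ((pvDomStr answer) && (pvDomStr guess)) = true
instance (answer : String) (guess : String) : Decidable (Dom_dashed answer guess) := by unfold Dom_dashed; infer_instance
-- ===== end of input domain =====

-- B replaces A's per-character membership scan by a one-pass index of answer positions
-- written into a '-' buffer (objective: alternative decomposition); return values proved equal.

-- ===== PORT A =====
-- A: result = ''; for i in range(len(answer)): result += answer[i] if answer[i] in guess else '-'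
-- `answer[i] in guess` is a single-character substring test, ported as PySem.Chars.isIn [c];
-- i always lies in range(len(answer)), so the total indexing form pyGetD is exact here.
def dashed (answer : String) (guess : String) : String :=
  String.ofList
    ((PySem.List.pyRange 0 (answer.toList.length : Int) 1).foldl
      (fun result i =>
        if PySem.Chars.isIn [PySem.List.pyGetD answer.toList i ' '] guess.toList
        then result ++ [PySem.List.pyGetD answer.toList i ' ']
        else result ++ ['-']) [])

-- ===== PORT B =====
-- B: positions.setdefault(ch, []).append(i) over enumerate(answer) (modeled as modify with
-- append); result = ['-']*n; for ch in dict.fromkeys(guess) (= PySem.List.dedup): for i in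
-- positions.get(ch, []): result[i] = ch; return ''.join(result).
-- The recorded indices are always in range, so the total assignment form pySetD is exact here.
def pvPositions (al : List Char) : PySem.Dict Char (List Int) :=
  (PySem.List.enumerate al).foldl
    (fun d p => d.modify p.2 [] (fun l => l ++ [p.1])) PySem.Dict.empty

def dashed_alt (answer : String) (guess : String) : String :=
  String.ofList
    ((PySem.List.dedup guess.toList).foldl
      (fun res c =>
        ((pvPositions answer.toList).getD c []).foldl
          (fun r i => PySem.List.pySetD r i c) res)
      (List.replicate answer.toList.length '-'))

-- ===== PRECONDITION & SPEC =====
def Spec_dashed (answer : String) (guess : String) (out : String) : Prop := out = dashed_alt answer guess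
instance (answer : String) (guess : String) (out : String) : Decidable (Spec_dashed answer guess out) := by unfold Spec_dashed; infer_instance

-- ===== CLAIM (what is proved, stated in full; the proofs are below) =====
def Claim_equal_dashed : Prop := ∀ (answer : String) (guess : String), Dom_dashed answer guess → Spec_dashed answer guess (dashed answer guess)

-- ===== LEMMAS AND PROOFS =====

-- the common value both programs compute
def pvMask (gl : List Char) (al : List Char) : List Char :=
  al.map (fun c => if c ∈ gl then c else '-')

-- single-character `in` is list membership
lemma isIn_singleton (x : Char) (l : List Char) :
    PySem.Chars.isIn [x] l = true ↔ x ∈ l := by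
  rw [PySem.Chars.isIn_iff_infix]
  exact List.singleton_infix_iff x l

-- ---- A-side: A's indexed loop builds pvMask ----
lemma dashed_eq_mask (answer guess : String) :
    dashed answer guess = String.ofList (pvMask guess.toList answer.toList) := by
  unfold dashed pvMask
  rw [PySem.List.foldl_pyRange_zero_pyGetD' answer.toList ' '
      (fun result c => if PySem.Chars.isIn [c] guess.toList then result ++ [c] else result ++ ['-']) []]
  congr 1
  induction answer.toList using List.reverseRecOn with
  | nil => rfl
  | append_singleton xs x ih =>
      rw [List.foldl_append, List.map_append, ih]
      simp only [List.foldl_cons, List.foldl_nil, List.map_cons, List.map_nil]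
      by_cases h : (x ∈ guess.toList)
      · simp [(isIn_singleton x guess.toList).mpr h, h]
      · have : PySem.Chars.isIn [x] guess.toList = false := by
          rw [← Bool.not_eq_true, isIn_singleton]; exact h
        simp [this, h]

-- ---- B-side ----

-- the grouping loop: positions[c] is the list of indices of c in answer, in order
lemma positions_getD (al : List Char) (c : Char) :
    (pvPositions al).getD c []
      = (((PySem.List.enumerate al).map Prod.swap).filter (fun p => p.1 == c)).map (·.2) := by
  unfold pvPositions
  have h : (PySem.List.enumerate al).foldl
      (fun d p => d.modify p.2 [] (fun l => l ++ [p.1])) PySem.Dict.empty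
      = ((PySem.List.enumerate al).map Prod.swap).foldl
          (fun d q => d.modify q.1 [] (fun l => l ++ [q.2])) PySem.Dict.empty :=
    by rw [List.foldl_map]; rfl
  rw [h, PySem.Dict.getD_foldl_modify_append]
  simp

lemma mem_positions_getD (al : List Char) (c : Char) (j : Int) :
    j ∈ (pvPositions al).getD c []
      ↔ ∃ (k : Nat) (h : k < al.length), al[k] = c ∧ j = (k : Int) := by
  rw [positions_getD]
  constructor
  · intro hj
    simp only [List.mem_map, List.mem_filter, List.mem_map] at hj
    obtain ⟨p, ⟨⟨q, hq, rfl⟩, hbeq⟩, rfl⟩ := hj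
    obtain ⟨k, hk, rfl⟩ := (PySem.List.mem_enumerate_iff _ _ _).mp hq
    exact ⟨k, hk, by simpa using hbeq, by simp⟩
  · rintro ⟨k, hk, hc, rfl⟩
    simp only [List.mem_map, List.mem_filter, List.mem_map]
    refine ⟨((al[k], (k : Int)) : Char × Int), ⟨⟨((k : Int), al[k]), ?_, rfl⟩, by simp [hc]⟩, rfl⟩
    exact (PySem.List.mem_enumerate_iff _ _ _).mpr ⟨k, hk, by simp⟩

-- the inner write loop preserves length
lemma write_fold_length (c : Char) (l : List Int) :
    ∀ (res : List Char), (l.foldl (fun r i => PySem.List.pySetD r i c) res).length = res.length := by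
  induction l with
  | nil => intro res; rfl
  | cons j t ih => intro res; rw [List.foldl_cons, ih]; exact PySem.List.length_pySetD res j c

-- the inner write loop, read at a natural index
lemma write_fold_get (c : Char) (l : List Int) :
    ∀ (res : List Char) (i : Nat),
      (∀ j ∈ l, ∃ k : Nat, j = (k : Int) ∧ k < res.length) →
      (l.foldl (fun r i => PySem.List.pySetD r i c) res)[i]?
        = if (i : Int) ∈ l then some c else res[i]? := by
  induction l with
  | nil => intro res i _; simp
  | cons j t ih =>
      intro res i hl
      obtain ⟨k, rfl, hk⟩ := hl j (by simp)
      rw [List.foldl_cons, ih (PySem.List.pySetD res (k : Int) c) i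
        (by intro j hj
            obtain ⟨k', rfl, hk'⟩ := hl j (by simp [hj])
            exact ⟨k', rfl, by rwa [PySem.List.length_pySetD]⟩)]
      by_cases ht : (i : Int) ∈ t
      · simp [ht]
      · simp only [ht, if_false, List.mem_cons, or_false]
        rw [PySem.List.pySetD_natCast]
        by_cases hik : (i : Int) = (k : Int)
        · obtain rfl : i = k := by exact_mod_cast hik
          simp [hk]
        · have hne : k ≠ i := fun h => hik (by simp [h])
          simp [hik, List.getElem?_set_ne hne]

-- the outer loop over guess, read at a natural index
lemma guess_fold_get (al : List Char) (g : List Char) :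
    ∀ (res : List Char), res.length = al.length → ∀ (i : Nat) (hi : i < al.length),
      (g.foldl
        (fun res c =>
          ((pvPositions al).getD c []).foldl (fun r i => PySem.List.pySetD r i c) res) res)[i]?
        = if al[i] ∈ g then some al[i] else res[i]? := by
  induction g with
  | nil => intro res _ i hi; simp
  | cons c t ih =>
      intro res hres i hi
      rw [List.foldl_cons, ih _ (by rw [write_fold_length]; exact hres) i hi]
      rw [write_fold_get c _ res i
        (by intro j hj
            obtain ⟨k, hk, _, rfl⟩ := (mem_positions_getD al c j).mp hj
            exact ⟨k, rfl, by omega⟩)]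
      have hmem : ((i : Int) ∈ (pvPositions al).getD c []) ↔ al[i] = c := by
        rw [mem_positions_getD]
        constructor
        · rintro ⟨k, hk, hc, hik⟩
          obtain rfl : i = k := by exact_mod_cast hik
          exact hc
        · intro hc; exact ⟨i, hi, hc, rfl⟩
      by_cases hmt : al[i] ∈ t
      · simp [hmt]
      · by_cases hc : al[i] = c
        · simp [hc, hmem.mpr hc]
        · have hnotmem : ¬ ((i : Int) ∈ (pvPositions al).getD c []) := by
            rw [hmem]; exact hc
          simp [hmt, hc, hnotmem]

-- the outer loop preserves length
lemma guess_fold_length (al : List Char) (g : List Char) :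
    ∀ (res : List Char),
      (g.foldl
        (fun res c =>
          ((pvPositions al).getD c []).foldl (fun r i => PySem.List.pySetD r i c) res) res).length
        = res.length := by
  induction g with
  | nil => intro res; rfl
  | cons c t ih => intro res; rw [List.foldl_cons, ih, write_fold_length]

lemma dashed_alt_eq_mask (answer guess : String) :
    dashed_alt answer guess = String.ofList (pvMask guess.toList answer.toList) := by
  unfold dashed_alt pvMask
  congr 1
  apply List.ext_getElem?
  intro i
  by_cases hi : i < answer.toList.length
  · rw [guess_fold_get answer.toList (PySem.List.dedup guess.toList) _ (List.length_replicate) i hi]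
    simp only [PySem.List.mem_dedup]
    have hi' : i < answer.length := by simpa using hi
    rw [List.getElem?_map, List.getElem?_eq_getElem hi, Option.map_some]
    split_ifs with h
    · rfl
    · simp [hi']
  · rw [List.getElem?_eq_none (by rw [guess_fold_length, List.length_replicate]; omega),
        List.getElem?_eq_none (by rw [List.length_map]; omega)]

-- ===== VERDICT (by name: the statement is the Claim_ definition above) =====
theorem dashed_spec : Claim_equal_dashed := by
  intro answer guess _
  unfold Spec_dashed
  rw [dashed_eq_mask, dashed_alt_eq_mask]
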